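-- pv_equiv track=rewrite | github.com/KhantNyi/Natural-Language-Processing-And-Social-Interaction | Week3-Language-Model/task2.py | frequency_check
-- ===== SOURCE A (Python) =====
-- def frequency_check(bigrams):
--     cfd = {}
--     for word1, word2 in bigrams:
--         if word1 not in cfd:
--             cfd[word1] = {}
--         if word2 not in cfd[word1]:
--             cfd[word1][word2] = 0
--         cfd[word1][word2] += 1 # counting occurrences of word2 after word1
--     return cfd
-- ===== SOURCE B (Python) =====
-- def frequency_check(bigrams):
--     # Two-pass: group successors per first word, then count each group.
--     groups = {}
--     for w1, w2 in bigrams: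
--         groups.setdefault(w1, []).append(w2)
--     return {w1: {w2: ws.count(w2) for w2 in dict.fromkeys(ws)}
--             for w1, ws in groups.items()}
-- ===== Notes on version B (the rewrite author's own statement) =====
-- stated objective: alternative
-- what changed: replaces A's inline nested-dict membership-guard counting with a two-pass shape: first group successors per first word into lists via setdefault/append, then build each inner dict by counting over the deduplicated group
import Mathlib
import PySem

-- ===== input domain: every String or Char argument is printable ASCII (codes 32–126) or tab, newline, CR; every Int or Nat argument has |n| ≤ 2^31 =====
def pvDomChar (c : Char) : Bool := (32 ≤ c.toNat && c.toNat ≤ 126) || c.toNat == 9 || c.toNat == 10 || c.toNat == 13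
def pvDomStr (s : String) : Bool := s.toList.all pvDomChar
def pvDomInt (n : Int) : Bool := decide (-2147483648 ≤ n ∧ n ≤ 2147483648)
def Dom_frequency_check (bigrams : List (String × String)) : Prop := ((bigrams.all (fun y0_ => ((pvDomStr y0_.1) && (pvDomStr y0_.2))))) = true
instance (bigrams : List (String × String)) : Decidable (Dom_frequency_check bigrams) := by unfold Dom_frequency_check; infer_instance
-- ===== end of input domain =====

-- B replaces A's inline nested-dict counting with a group-then-count two-pass shape (alternative decomposition, similar cost).

-- ===== PORT A =====
-- literal port of A: one loop over bigrams maintaining a dict of dicts of counts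
def frequency_check (bigrams : List (String × String)) : List (String × List (String × Int)) :=
  (bigrams.foldl (fun cfd p =>
      let cfd1 := if cfd.contains p.1 then cfd else cfd.insert p.1 PySem.Dict.empty
      let inner0 := cfd1.getD p.1 PySem.Dict.empty
      let inner1 := if inner0.contains p.2 then inner0 else inner0.insert p.2 (0 : Int)
      cfd1.insert p.1 (inner1.insert p.2 (inner1.getD p.2 0 + 1)))
    PySem.Dict.empty).items.map (fun q => (q.1, q.2.items))

-- ===== PORT B =====
-- port of B: pass 1 groups successors per first word; pass 2 counts each group
-- ({w2: ws.count(w2) for w2 in dict.fromkeys(ws)} = dedup ws mapped to counts)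
def frequency_check_alt (bigrams : List (String × String)) : List (String × List (String × Int)) :=
  let groups := bigrams.foldl (fun g p => g.modify p.1 [] (· ++ [p.2])) PySem.Dict.empty
  groups.items.map (fun q => (q.1, (PySem.List.dedup q.2).map (fun w => (w, (q.2.count w : Int)))))

-- ===== PRECONDITION & SPEC =====
def Spec_frequency_check (bigrams : List (String × String)) (out : List (String × List (String × Int))) : Prop := out = frequency_check_alt bigrams
instance (bigrams : List (String × String)) (out : List (String × List (String × Int))) : Decidable (Spec_frequency_check bigrams out) := by unfold Spec_frequency_check; infer_instance

-- ===== CLAIM (what is proved, stated in full; the proofs are below) =====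
def Claim_equal_frequency_check : Prop := ∀ (bigrams : List (String × String)), Dom_frequency_check bigrams → Spec_frequency_check bigrams (frequency_check bigrams)

-- ===== LEMMAS AND PROOFS =====

-- proof-only helpers: apply counter to every value of a group dict
def cntz (q : String × List String) : String × PySem.Dict String Int := (q.1, PySem.Dict.counter q.2)
def mapC (g : PySem.Dict String (List String)) : PySem.Dict String (PySem.Dict String Int) :=
  PySem.Dict.mk (g.items.map cntz)

theorem contains_mapC (g : PySem.Dict String (List String)) (k : String) :
    (mapC g).contains k = g.contains k := by
  simp only [mapC, PySem.Dict.contains, List.any_map]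
  exact congrArg _ (funext fun p => rfl)

theorem get?_mapC (g : PySem.Dict String (List String)) (k : String) :
    (mapC g).get? k = (g.get? k).map PySem.Dict.counter := by
  simp only [mapC, PySem.Dict.get?, List.find?_map]
  have hp : ((fun p : String × PySem.Dict String Int => p.1 == k) ∘ cntz)
      = (fun p : String × List String => p.1 == k) := by
    funext p; simp [cntz]
  rw [hp]
  cases hf : g.items.find? (fun p => p.1 == k) <;> simp [cntz]

theorem getD_mapC (g : PySem.Dict String (List String)) (k : String) :
    (mapC g).getD k PySem.Dict.empty = PySem.Dict.counter (g.getD k []) := by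
  rw [PySem.Dict.getD_eq_get?_getD, get?_mapC, PySem.Dict.getD_eq_get?_getD]
  rcases g.get? k with _ | ws <;> rfl

theorem mapC_insert (g : PySem.Dict String (List String)) (k : String) (ws : List String) :
    mapC (g.insert k ws) = (mapC g).insert k (PySem.Dict.counter ws) := by
  apply PySem.Dict.ext
  by_cases h : g.contains k = true
  · have h2 : (mapC g).contains k = true := by rw [contains_mapC]; exact h
    rw [show (mapC (g.insert k ws)).items = (g.insert k ws).items.map cntz from rfl,
        PySem.Dict.items_insert_of_contains _ _ h,
        PySem.Dict.items_insert_of_contains _ _ h2,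
        show (mapC g).items = g.items.map cntz from rfl,
        List.map_map, List.map_map]
    apply List.map_congr_left
    intro p _
    by_cases hp : p.1 = k <;> simp [cntz, hp]
  · have h1 : g.contains k = false := by simpa using h
    have h2 : (mapC g).contains k = false := by rw [contains_mapC]; exact h1
    rw [show (mapC (g.insert k ws)).items = (g.insert k ws).items.map cntz from rfl,
        PySem.Dict.items_insert_of_not_contains _ _ h1,
        PySem.Dict.items_insert_of_not_contains _ _ h2]
    simp [mapC, cntz]

-- A's inner two steps are exactly one Counter update
theorem inner_step (d : PySem.Dict String Int) (w : String) :
    (if d.contains w then d else d.insert w (0 : Int)).insert w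
      ((if d.contains w then d else d.insert w (0 : Int)).getD w 0 + 1)
    = d.modify w 0 (· + 1) := by
  by_cases h : d.contains w = true
  · simp [h, PySem.Dict.modify]
  · have h1 : d.contains w = false := by simpa using h
    simp only [h1, Bool.false_eq_true, if_neg, not_false_eq_true]
    rw [PySem.Dict.getD_insert_self, PySem.Dict.insert_insert_self, PySem.Dict.modify,
      PySem.Dict.getD_of_not_contains _ _ h1]

-- one iteration of A's loop on (mapC g) = mapC of one iteration of B's grouping loop
theorem step_lemma (g : PySem.Dict String (List String)) (p : String × String) :
    (fun cfd (p : String × String) =>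
      let cfd1 := if cfd.contains p.1 then cfd else cfd.insert p.1 PySem.Dict.empty
      let inner0 := cfd1.getD p.1 PySem.Dict.empty
      let inner1 := if inner0.contains p.2 then inner0 else inner0.insert p.2 (0 : Int)
      cfd1.insert p.1 (inner1.insert p.2 (inner1.getD p.2 0 + 1))) (mapC g) p
    = mapC (g.modify p.1 [] (· ++ [p.2])) := by
  simp only []
  rw [PySem.Dict.modify, mapC_insert]
  by_cases h : g.contains p.1 = true
  · have h2 : (mapC g).contains p.1 = true := by rw [contains_mapC]; exact h
    simp only [h2, if_true]
    rw [getD_mapC, inner_step, PySem.Dict.counter_append_singleton]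
  · have h1 : g.contains p.1 = false := by simpa using h
    have h2 : (mapC g).contains p.1 = false := by rw [contains_mapC]; exact h1
    simp only [h2, Bool.false_eq_true, if_false]
    rw [PySem.Dict.getD_insert_self, inner_step, PySem.Dict.insert_insert_self,
      PySem.Dict.getD_of_not_contains _ _ h1]
    rfl

theorem fold_invariant (l : List (String × String)) (g : PySem.Dict String (List String)) :
    l.foldl (fun cfd p =>
      let cfd1 := if cfd.contains p.1 then cfd else cfd.insert p.1 PySem.Dict.empty
      let inner0 := cfd1.getD p.1 PySem.Dict.empty
      let inner1 := if inner0.contains p.2 then inner0 else inner0.insert p.2 (0 : Int)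
      cfd1.insert p.1 (inner1.insert p.2 (inner1.getD p.2 0 + 1))) (mapC g)
    = mapC (l.foldl (fun g p => g.modify p.1 [] (· ++ [p.2])) g) := by
  induction l generalizing g with
  | nil => rfl
  | cons p l ih =>
    have key := step_lemma g p
    simp only [] at key
    simp only [List.foldl_cons]
    rw [key]
    exact ih _

-- ===== VERDICT (by name: the statement is the Claim_ definition above) =====
theorem frequency_check_spec : Claim_equal_frequency_check := by
  intro bigrams _
  unfold Spec_frequency_check frequency_check frequency_check_alt
  have h0 : (PySem.Dict.empty : PySem.Dict String (PySem.Dict String Int)) = mapC PySem.Dict.empty := rfl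
  rw [h0, fold_invariant]
  simp only [mapC, List.map_map]
  apply List.map_congr_left
  intro q _
  simp [cntz, PySem.Dict.items_counter, PySem.List.dedup_eq_ofList]
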